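-- pv_equiv track=rewrite | github.com/ltgoslo/NARC | data/v0.4/annotation_bokmaal/Runde2_unike_tekster/for_lange_tekster_fire_siste/kjoer_inne_i_prosjektmappe2.py | indekser
-- ===== SOURCE A (Python) =====
-- def indekser(start_index,sentence_tokens, sublist): #petter
--     # Takes the start index of a sentence (start_index)
--     # and a list of all the tokens in the sentence (sentence_tokens)
--     # and a list that forms a noun phrase (sublist)
--     indices = []
--     index = start_index
--     num = 0
--     sent_length = len(sentence_tokens)
--     # legger til +1 fordi sublist-indeksene begynner på 1.
--     while num < sent_length:
--         if num+1 not in sublist: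
--             index += len(sentence_tokens[num]) + 1
--             num += 1
--         else:
--             indices.append(index)
--             while num+1 in sublist:
--                 index += len(sentence_tokens[num]) + 1
--                 num += 1
--             indices.append(index-1)
--     return indices[0],indices[-1]
-- ===== SOURCE B (Python) =====
-- def indekser(start_index, sentence_tokens, sublist):
--     # O(n + m): set membership + single pass over the hit indices and two prefix-sum walks
--     s = set(sublist)
--     hits = [i for i in range(len(sentence_tokens)) if i + 1 in s]
--     first, last = hits[0], hits[-1]
--     start = start_index
--     for tok in sentence_tokens[:first]:
--         start += len(tok) + 1
--     end = start
--     for tok in sentence_tokens[first:last + 1]: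
--         end += len(tok) + 1
--     return start, end - 1
-- ===== Notes on version B (the rewrite author's own statement) =====
-- stated objective: faster
-- what changed: A scans runs with an O(len(sublist)) 'in sublist' test per token position; B builds a set once, collects the matching positions in one pass, and computes the two offsets directly as prefix sums over slices.
import Mathlib
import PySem

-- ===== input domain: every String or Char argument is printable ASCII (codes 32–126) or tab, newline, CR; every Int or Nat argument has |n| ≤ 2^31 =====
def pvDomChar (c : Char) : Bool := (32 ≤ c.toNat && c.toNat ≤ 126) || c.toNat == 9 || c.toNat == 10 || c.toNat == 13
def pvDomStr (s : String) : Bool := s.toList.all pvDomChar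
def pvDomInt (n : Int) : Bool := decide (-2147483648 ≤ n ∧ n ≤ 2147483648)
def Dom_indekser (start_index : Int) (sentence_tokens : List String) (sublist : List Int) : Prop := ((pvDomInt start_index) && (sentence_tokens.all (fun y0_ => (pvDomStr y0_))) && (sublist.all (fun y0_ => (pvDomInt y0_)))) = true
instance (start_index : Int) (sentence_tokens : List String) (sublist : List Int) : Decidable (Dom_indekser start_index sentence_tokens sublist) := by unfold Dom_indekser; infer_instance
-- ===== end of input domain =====

-- B replaces A's run-scanning loop with quadratic 'in sublist' tests by a set-membership hit list
-- plus two prefix-sum walks (objective: faster).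

-- ===== PORT A =====
-- inner 'while num+1 in sublist' loop; the 'num < length' guard only makes it total where the
-- Python raises IndexError (excluded by Pre_)
def pvInnerA (toks : List String) (sub : List Int) (num : Nat) (index : Int) : Nat × Int :=
  if h : ((num : Int) + 1) ∈ sub ∧ num < toks.length then
    pvInnerA toks sub (num + 1) (index + PySem.Str.len (toks.getD num "") + 1)
  else (num, index)
termination_by toks.length - num
decreasing_by omega

theorem pvInnerA_fst_ge (toks : List String) (sub : List Int) :
    ∀ num index, num ≤ (pvInnerA toks sub num index).1 := by
  intro num index
  fun_induction pvInnerA toks sub num index with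
  | case1 num index h ih => omega
  | case2 num index h => simp

theorem pvInnerA_fst_lt (toks : List String) (sub : List Int) (num : Nat) (index : Int)
    (hm : ((num : Int) + 1) ∈ sub) (hlt : num < toks.length) :
    num < (pvInnerA toks sub num index).1 := by
  rw [pvInnerA]
  rw [dif_pos ⟨hm, hlt⟩]
  have := pvInnerA_fst_ge toks sub (num + 1) (index + PySem.Str.len (toks.getD num "") + 1)
  omega

-- outer 'while num < sent_length' loop, accumulating the 'indices' list
def pvOuterA (toks : List String) (sub : List Int) (num : Nat) (index : Int) (indices : List Int) :
    List Int :=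
  if hlt : num < toks.length then
    if hm : ((num : Int) + 1) ∈ sub then
      let p := pvInnerA toks sub num index
      pvOuterA toks sub p.1 p.2 ((indices ++ [index]) ++ [p.2 - 1])
    else
      pvOuterA toks sub (num + 1) (index + PySem.Str.len (toks.getD num "") + 1) indices
  else indices
termination_by toks.length - num
decreasing_by
  · have := pvInnerA_fst_lt toks sub num index hm hlt; omega
  · omega

def indekser (start_index : Int) (sentence_tokens : List String) (sublist : List Int) : List Int :=
  let indices := pvOuterA sentence_tokens sublist 0 start_index []
  -- 'return indices[0], indices[-1]' (IndexError on empty 'indices' is excluded by Pre_)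
  match PySem.List.pyGet? indices 0, PySem.List.pyGet? indices (-1) with
  | some a, some b => [a, b]
  | _, _ => []

-- ===== PORT B =====
-- 'for tok in l: off += len(tok) + 1'
def pvAdvance (off : Int) (l : List String) : Int :=
  l.foldl (fun o t => o + PySem.Str.len t + 1) off

def indekser_alt (start_index : Int) (sentence_tokens : List String) (sublist : List Int) :
    List Int :=
  let s : PySem.Set Int := PySem.Set.ofList sublist
  let hits : List Int :=
    (PySem.List.pyRange 0 (PySem.List.len sentence_tokens) 1).filter
      (fun i => PySem.Set.contains s (i + 1))
  match PySem.List.pyGet? hits 0 with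
  | none => []  -- hits[0] raises IndexError in Python (excluded by Pre_)
  | some f =>
    match PySem.List.pyGet? hits (-1) with
    | none => []
    | some l =>
      let start := pvAdvance start_index (PySem.List.slice sentence_tokens none (some f))
      let e := pvAdvance start (PySem.List.slice sentence_tokens (some f) (some (l + 1)))
      [start, e - 1]

-- ===== PRECONDITION & SPEC =====
-- Pre_ excludes exactly the inputs where the Python A raises: no token position matches sublist
-- (indices stays empty, 'indices[0]' raises IndexError), or the final run reaches the end of the
-- sentence and sent_length+1 is also in sublist (the inner loop reads past the token list).
def Pre_indekser (start_index : Int) (sentence_tokens : List String) (sublist : List Int) : Prop :=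
  (∃ i, i < sentence_tokens.length ∧ ((i : Int) + 1) ∈ sublist) ∧
    ¬(((sentence_tokens.length : Int)) ∈ sublist ∧ ((sentence_tokens.length : Int) + 1) ∈ sublist)
instance (start_index : Int) (sentence_tokens : List String) (sublist : List Int) :
    Decidable (Pre_indekser start_index sentence_tokens sublist) := by
  unfold Pre_indekser; infer_instance
def pvWitness_indekser : Int × List String × List Int := (0, ["a"], [1])

def Spec_indekser (start_index : Int) (sentence_tokens : List String) (sublist : List Int)
    (out : List Int) : Prop := out = indekser_alt start_index sentence_tokens sublist
instance (start_index : Int) (sentence_tokens : List String) (sublist : List Int) (out : List Int) :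
    Decidable (Spec_indekser start_index sentence_tokens sublist out) := by
  unfold Spec_indekser; infer_instance

-- ===== CLAIM (what is proved, stated in full; the proofs are below) =====
def Claim_equal_indekser : Prop := ∀ (start_index : Int) (sentence_tokens : List String) (sublist : List Int), Dom_indekser start_index sentence_tokens sublist → Pre_indekser start_index sentence_tokens sublist → Spec_indekser start_index sentence_tokens sublist (indekser start_index sentence_tokens sublist)

-- ===== LEMMAS AND PROOFS =====

-- the list of matching token positions from position num on
def pvMatches (toks : List String) (sub : List Int) (num : Nat) : List Nat :=
  if num < toks.length then
    (if ((num : Int) + 1) ∈ sub then num :: pvMatches toks sub (num + 1)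
     else pvMatches toks sub (num + 1))
  else []
termination_by toks.length - num
decreasing_by all_goals omega

-- the tokens of positions [num, k)
def pvSeg (toks : List String) (num k : Nat) : List String := (toks.drop num).take (k - num)

theorem pvSeg_self (toks : List String) (num : Nat) : pvSeg toks num num = [] := by
  simp [pvSeg]

theorem pvSeg_cons (toks : List String) (num k : Nat) (h : num < toks.length) (hk : num + 1 ≤ k) :
    pvSeg toks num k = toks[num] :: pvSeg toks (num + 1) k := by
  unfold pvSeg
  rw [List.drop_eq_getElem_cons h]
  have : k - num = (k - (num + 1)) + 1 := by omega
  rw [this, List.take_succ_cons]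

theorem pvSeg_append (toks : List String) (num k m : Nat) (h1 : num ≤ k) (h2 : k ≤ m) :
    pvSeg toks num m = pvSeg toks num k ++ pvSeg toks k m := by
  unfold pvSeg
  have : m - num = (k - num) + (m - k) := by omega
  rw [this, List.take_add, List.drop_drop]
  have h3 : num + (k - num) = k := by omega
  rw [h3]

theorem pvAdvance_append (off : Int) (l1 l2 : List String) :
    pvAdvance off (l1 ++ l2) = pvAdvance (pvAdvance off l1) l2 := by
  simp [pvAdvance, List.foldl_append]

theorem pvMatches_nil (toks : List String) (sub : List Int) (num : Nat)
    (h : ¬ num < toks.length) : pvMatches toks sub num = [] := by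
  rw [pvMatches, if_neg h]

theorem pvMatches_cons (toks : List String) (sub : List Int) (num : Nat)
    (hlt : num < toks.length) (hm : ((num : Int) + 1) ∈ sub) :
    pvMatches toks sub num = num :: pvMatches toks sub (num + 1) := by
  rw [pvMatches, if_pos hlt, if_pos hm]

theorem pvMatches_skip (toks : List String) (sub : List Int) (num : Nat)
    (hlt : num < toks.length) (hm : ¬ ((num : Int) + 1) ∈ sub) :
    pvMatches toks sub num = pvMatches toks sub (num + 1) := by
  rw [pvMatches, if_pos hlt, if_neg hm]

theorem pvMatches_mem (toks : List String) (sub : List Int) :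
    ∀ num, ∀ i ∈ pvMatches toks sub num, num ≤ i ∧ i < toks.length := by
  intro num
  fun_induction pvMatches toks sub num with
  | case1 num h hm ih =>
    intro i hi
    rcases List.mem_cons.mp hi with rfl | hi
    · omega
    · have := ih i hi; omega
  | case2 num h hm ih =>
    intro i hi; have := ih i hi; omega
  | case3 num h => intro i hi; simp at hi

theorem pvMatches_head_min (toks : List String) (sub : List Int) :
    ∀ num f, (pvMatches toks sub num).head? = some f →
      ∀ j ∈ pvMatches toks sub num, f ≤ j := by
  intro num
  fun_induction pvMatches toks sub num with
  | case1 num h hm ih =>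
    intro f hf j hj
    simp only [List.head?_cons, Option.some.injEq] at hf
    subst hf
    rcases List.mem_cons.mp hj with rfl | hj
    · omega
    · have := pvMatches_mem toks sub (num + 1) j hj; omega
  | case2 num h hm ih => exact ih
  | case3 num h => intro f hf; simp at hf

-- the inner loop consumes a whole run: its final offset is the advance over the consumed segment,
-- and the matching positions from num split into the run and the matches from its end
theorem pvInnerA_spec (toks : List String) (sub : List Int) :
    ∀ num index, num ≤ toks.length →
      (pvInnerA toks sub num index).1 ≤ toks.length ∧
      (pvInnerA toks sub num index).2 =
        pvAdvance index (pvSeg toks num (pvInnerA toks sub num index).1) ∧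
      pvMatches toks sub num =
        List.range' num ((pvInnerA toks sub num index).1 - num) ++
          pvMatches toks sub (pvInnerA toks sub num index).1 := by
  intro num index hn
  fun_induction pvInnerA toks sub num index with
  | case1 num index h ih =>
    obtain ⟨hm, hlt⟩ := h
    have hge := pvInnerA_fst_ge toks sub (num + 1) (index + PySem.Str.len (toks.getD num "") + 1)
    obtain ⟨h1, h2, h3⟩ := ih (by omega)
    refine ⟨h1, ?_, ?_⟩
    · rw [h2, pvSeg_cons toks num _ hlt (by omega)]
      simp [pvAdvance, List.getD_eq_getElem?_getD, List.getElem?_eq_getElem hlt]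
    · rw [pvMatches_cons toks sub num hlt hm, h3]
      have harith : (pvInnerA toks sub (num + 1)
          (index + PySem.Str.len (toks.getD num "") + 1)).1 - num =
          ((pvInnerA toks sub (num + 1)
            (index + PySem.Str.len (toks.getD num "") + 1)).1 - (num + 1)) + 1 := by omega
      rw [harith, List.range'_succ]
      simp
  | case2 num index h =>
    refine ⟨hn, ?_, ?_⟩
    · simp [pvSeg_self, pvAdvance]
    · simp

-- the outer loop appends, after the given accumulator, a list whose first element is the offset of
-- the first matching position and whose last element is the end offset of the last matching position
theorem pvOuterA_spec (toks : List String) (sub : List Int) :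
    ∀ num index indices, num ≤ toks.length →
      ∃ L, pvOuterA toks sub num index indices = indices ++ L ∧
        L.head? = (pvMatches toks sub num).head?.map (fun i => pvAdvance index (pvSeg toks num i)) ∧
        L.getLast? = (pvMatches toks sub num).getLast?.map
          (fun i => pvAdvance index (pvSeg toks num (i + 1)) - 1) := by
  intro num index indices hn
  fun_induction pvOuterA toks sub num index indices with
  | case1 num index indices hlt hm p ih =>
    -- matching branch: a run is consumed by the inner loop
    have hpe : pvInnerA toks sub num index = p := rfl
    obtain ⟨hk, ho, hsplit⟩ := pvInnerA_spec toks sub num index (by omega)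
    rw [hpe] at hk ho hsplit
    have hklt : num < p.1 := by
      have := pvInnerA_fst_lt toks sub num index hm hlt
      rw [hpe] at this; exact this
    obtain ⟨L', hL', hh', hl'⟩ := ih hk
    refine ⟨index :: (p.2 - 1) :: L', by simpa using hL', ?_, ?_⟩
    · rw [pvMatches_cons toks sub num hlt hm]
      simp [pvSeg_self, pvAdvance]
    · have hrunlast : (List.range' num (p.1 - num)).getLast? = some (p.1 - 1) := by
        have h1 : p.1 - num = (p.1 - 1 - num) + 1 := by omega
        rw [h1, List.range'_1_concat, List.getLast?_concat]
        congr 1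
        omega
      have hMlast : (pvMatches toks sub num).getLast? =
          ((pvMatches toks sub p.1).getLast?).or (some (p.1 - 1)) := by
        rw [hsplit, List.getLast?_append, hrunlast]
      rcases hmp : (pvMatches toks sub p.1).getLast? with _ | j
      · -- no further matches: L' is empty
        have hL'nil : L' = [] := by
          rw [hmp] at hl'
          exact List.getLast?_eq_none_iff.mp (by rw [hl']; rfl)
        subst hL'nil
        rw [hMlast, hmp, Option.none_or]
        show some (p.2 - 1) = some (pvAdvance index (pvSeg toks num (p.1 - 1 + 1)) - 1)
        rw [show p.1 - 1 + 1 = p.1 from by omega, ← ho]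
      · -- further matches exist: the last element comes from the recursive call
        have hjge : p.1 ≤ j := (pvMatches_mem toks sub p.1 j (List.mem_of_getLast? hmp)).1
        obtain ⟨c, t, rfl⟩ : ∃ c t, L' = c :: t := by
          cases hc : L' with
          | nil => rw [hc, hmp] at hl'; simp at hl'
          | cons c t => exact ⟨c, t, rfl⟩
        rw [hMlast, hmp, Option.some_or]
        rw [show (index :: (p.2 - 1) :: c :: t).getLast? = (c :: t).getLast? from by
          simp [List.getLast?_cons_cons]]
        rw [hl', hmp]
        simp only [Option.map_some, Option.some.injEq]
        rw [ho, ← pvAdvance_append, ← pvSeg_append toks num p.1 (j + 1) (by omega) (by omega)]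
  | case2 num index indices hlt hm ih =>
    -- non-matching branch: position num contributes toks[num] to every later segment
    obtain ⟨L, hL, hh, hl⟩ := ih (by omega)
    have hshift : ∀ i, num + 1 ≤ i →
        pvAdvance (index + PySem.Str.len (toks.getD num "") + 1) (pvSeg toks (num + 1) i) =
          pvAdvance index (pvSeg toks num i) := by
      intro i hi
      rw [pvSeg_cons toks num i hlt hi]
      simp [pvAdvance, List.getD_eq_getElem?_getD, List.getElem?_eq_getElem hlt]
    refine ⟨L, hL, ?_, ?_⟩
    · rw [hh, pvMatches_skip toks sub num hlt hm]
      rcases hmh : (pvMatches toks sub (num + 1)).head? with _ | i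
      · simp
      · have hge : num + 1 ≤ i :=
          (pvMatches_mem toks sub (num + 1) i (List.mem_of_mem_head? (by simp [hmh]))).1
        simp only [Option.map_some, Option.some.injEq]
        exact hshift i hge
    · rw [hl, pvMatches_skip toks sub num hlt hm]
      rcases hmh : (pvMatches toks sub (num + 1)).getLast? with _ | i
      · simp
      · have hge : num + 1 ≤ i :=
          (pvMatches_mem toks sub (num + 1) i (List.mem_of_getLast? hmh)).1
        simp only [Option.map_some, Option.some.injEq]
        rw [hshift (i + 1) (by omega)]
  | case3 num index indices hlt =>
    refine ⟨[], by simp, ?_, ?_⟩ <;> rw [pvMatches_nil toks sub num hlt] <;> simp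

-- B's hit list is the cast of the matching-position list
theorem pvHits_eq_range' (toks : List String) (sub : List Int) :
    ∀ m num, num + m = toks.length →
      (List.range' num m).filter (fun k : Nat => decide (((k : Int) + 1) ∈ sub)) =
        pvMatches toks sub num := by
  intro m
  induction m with
  | zero =>
    intro num h
    rw [pvMatches_nil toks sub num (by omega)]
    simp
  | succ m ih =>
    intro num h
    rw [List.range'_succ, List.filter_cons, ih (num + 1) (by omega)]
    by_cases hm : ((num : Int) + 1) ∈ sub
    · rw [pvMatches_cons toks sub num (by omega) hm]
      simp [hm]
    · rw [pvMatches_skip toks sub num (by omega) hm]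
      simp [hm]

theorem pvContains_eq (sub : List Int) (x : Int) :
    PySem.Set.contains (PySem.Set.ofList sub) x = decide (x ∈ sub) := by
  by_cases h : x ∈ sub
  · simp only [decide_eq_true h]
    exact (PySem.Set.contains_iff _ _).mpr ((PySem.Set.mem_ofList _ _).mpr h)
  · simp only [decide_eq_false h]
    cases hval : PySem.Set.contains (PySem.Set.ofList sub) x
    · rfl
    · exact absurd ((PySem.Set.mem_ofList _ _).mp ((PySem.Set.contains_iff _ _).mp hval)) h

theorem pvHits_eq (toks : List String) (sub : List Int) :
    (PySem.List.pyRange 0 (PySem.List.len toks) 1).filter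
        (fun i => PySem.Set.contains (PySem.Set.ofList sub) (i + 1)) =
      (pvMatches toks sub 0).map (fun k : Nat => (k : Int)) := by
  simp only [PySem.List.len_eq]
  rw [PySem.List.pyRange_zero_nat, List.filter_map]
  rw [List.filter_congr (fun k _ => by
    show PySem.Set.contains (PySem.Set.ofList sub) ((k : Int) + 1) =
      (fun k : Nat => decide (((k : Int) + 1) ∈ sub)) k
    exact pvContains_eq sub ((k : Int) + 1))]
  rw [List.range_eq_range', pvHits_eq_range' toks sub toks.length 0 (by omega)]

-- ===== VERDICT (by name: the statement is the Claim_ definition above) =====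
theorem indekser_spec : Claim_equal_indekser := by
  intro start_index toks sub _ _
  unfold Spec_indekser indekser indekser_alt
  obtain ⟨L, hL, hh, hl⟩ := pvOuterA_spec toks sub 0 start_index [] (by omega)
  dsimp only
  rw [hL, pvHits_eq toks sub]
  simp only [List.nil_append]
  cases hhd : (pvMatches toks sub 0).head? with
  | none =>
    have hMnil : pvMatches toks sub 0 = [] := List.head?_eq_none_iff.mp hhd
    have hLnil : L = [] := List.head?_eq_none_iff.mp (by rw [hh, hhd]; rfl)
    rw [hMnil, hLnil]
    simp [PySem.List.pyGet?, PySem.List.pyIdx?]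
  | some f =>
    have hMne : pvMatches toks sub 0 ≠ [] := by
      intro h; rw [h] at hhd; simp at hhd
    cases hlast : (pvMatches toks sub 0).getLast? with
    | none => exact absurd (List.getLast?_eq_none_iff.mp hlast) hMne
    | some l0 =>
      have hfle : f ≤ l0 := pvMatches_head_min toks sub 0 f hhd l0 (List.mem_of_getLast? hlast)
      have hLhead : PySem.List.pyGet? L 0 = some (pvAdvance start_index (pvSeg toks 0 f)) := by
        rw [PySem.List.pyGet?_zero, ← List.head?_eq_getElem?, hh, hhd]; rfl
      have hLlast : PySem.List.pyGet? L (-1) =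
          some (pvAdvance start_index (pvSeg toks 0 (l0 + 1)) - 1) := by
        rw [PySem.List.pyGet?_neg_one, hl, hlast]; rfl
      have hBhd : PySem.List.pyGet? ((pvMatches toks sub 0).map (fun k : Nat => (k : Int))) 0 =
          some ((f : Int)) := by
        rw [PySem.List.pyGet?_zero, ← List.head?_eq_getElem?, List.head?_map, hhd]; rfl
      have hBlast : PySem.List.pyGet? ((pvMatches toks sub 0).map (fun k : Nat => (k : Int))) (-1) =
          some ((l0 : Int)) := by
        rw [PySem.List.pyGet?_neg_one, List.getLast?_map, hlast]; rfl
      rw [hLhead, hLlast, hBhd, hBlast]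
      dsimp only
      have hslice1 : PySem.List.slice toks none (some ((f : Nat) : Int)) = pvSeg toks 0 f := by
        rw [PySem.List.slice_to_natCast]
        simp [pvSeg]
      have hslice2 : PySem.List.slice toks (some ((f : Nat) : Int))
          (some (((l0 : Nat) : Int) + 1)) = pvSeg toks f (l0 + 1) := by
        have hc : ((l0 : Nat) : Int) + 1 = (((l0 + 1 : Nat)) : Int) := by push_cast; ring
        rw [hc, PySem.List.slice_natCast]
        simp [pvSeg]
      rw [hslice1, hslice2]
      rw [pvSeg_append toks 0 f (l0 + 1) (by omega) (by omega), pvAdvance_append]
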